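-- pv_equiv track=rewrite | github.com/gitnoober/cp | codechef/cc_coders/D.py | f
-- ===== SOURCE A (Python) =====
-- def f(s, d):
--     cnt = 0
--     n = len(s)
--     for i in d:
--         j = 0
--
--         lst = n - 1
--         c1 = c2 = fst = 0
--
--         while lst >= 0 and s[lst] == i:
--             lst -= 1
--             c1 += 1
--
--         while fst < n and s[fst] == i:
--             fst += 1
--             c2 += 1
--
--         cnt = max(cnt, c1, c2)
--
--     return cnt
-- ===== SOURCE B (Python) =====
-- def f(s, d):
--     # Precompute the leading and trailing run (char, length) of s once,
--     # then each element of d is a constant-time lookup.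
--     n = len(s)
--     if n:
--         lead = 1
--         while lead < n and s[lead] == s[0]:
--             lead += 1
--         trail = 1
--         while trail < n and s[n - 1 - trail] == s[n - 1]:
--             trail += 1
--         lc, tc = s[0], s[n - 1]
--     else:
--         lead = trail = 0
--         lc = tc = None
--     cnt = 0
--     for i in d:
--         if i == lc and lead > cnt:
--             cnt = lead
--         if i == tc and trail > cnt:
--             cnt = trail
--     return cnt
-- ===== Notes on version B (the rewrite author's own statement) =====
-- stated objective: faster
-- what changed: B precomputes the leading and trailing run (character, length) of s once and reduces each element of d to two O(1) comparisons, instead of re-scanning s from both ends for every element of d.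
import Mathlib
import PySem

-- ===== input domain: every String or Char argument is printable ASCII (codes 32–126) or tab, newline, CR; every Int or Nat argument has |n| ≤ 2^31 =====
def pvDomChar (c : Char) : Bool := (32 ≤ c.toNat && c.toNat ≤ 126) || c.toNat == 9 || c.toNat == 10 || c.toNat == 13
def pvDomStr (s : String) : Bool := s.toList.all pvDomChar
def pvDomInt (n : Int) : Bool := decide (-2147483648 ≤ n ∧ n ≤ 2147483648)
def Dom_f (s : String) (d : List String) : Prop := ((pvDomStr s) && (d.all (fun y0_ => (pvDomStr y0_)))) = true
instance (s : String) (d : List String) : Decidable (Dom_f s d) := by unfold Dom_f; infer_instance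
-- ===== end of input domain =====

-- B precomputes the leading/trailing run of s once and does two O(1) comparisons
-- per element of d; A re-scans s from both ends for every element of d.

-- ===== PORT A =====
-- A's while loops count, from one end of s, how many consecutive characters
-- (as one-character strings) equal i; this helper is that while loop.
def pyCountWhile (p : Char → Bool) : List Char → Nat
  | [] => 0
  | c :: r => if p c then pyCountWhile p r + 1 else 0

def f (s : String) (d : List String) : Int :=
  d.foldl (fun cnt i =>
    let c1 : Int := (pyCountWhile (fun c => String.ofList [c] == i) s.toList.reverse : Nat)
    let c2 : Int := (pyCountWhile (fun c => String.ofList [c] == i) s.toList : Nat)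
    max cnt (max c1 c2)) 0

-- ===== PORT B =====
-- length of the run of copies of x at the front of the list (B's while loops)
def runLen (x : Char) : List Char → Nat
  | [] => 0
  | c :: r => if c == x then runLen x r + 1 else 0

def f_alt (s : String) (d : List String) : Int :=
  match s.toList, s.toList.reverse with
  | c0 :: r0, c1 :: r1 =>
      let lead : Int := (runLen c0 r0 : Nat) + 1
      let trail : Int := (runLen c1 r1 : Nat) + 1
      d.foldl (fun cnt i =>
        let cnt1 := if i == String.ofList [c0] && decide (cnt < lead) then lead else cnt
        if i == String.ofList [c1] && decide (cnt1 < trail) then trail else cnt1) 0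
  | _, _ => 0

-- ===== PRECONDITION & SPEC =====
def Spec_f (s : String) (d : List String) (out : Int) : Prop := out = f_alt s d
instance (s : String) (d : List String) (out : Int) : Decidable (Spec_f s d out) := by unfold Spec_f; infer_instance

-- ===== CLAIM (what is proved, stated in full; the proofs are below) =====
def Claim_equal_f : Prop := ∀ (s : String) (d : List String), Dom_f s d → Spec_f s d (f s d)

-- ===== LEMMAS AND PROOFS =====

theorem ofList_singleton_inj (c c0 : Char) : String.ofList [c] = String.ofList [c0] ↔ c = c0 := by
  constructor
  · intro h
    have := congrArg String.toList h
    simpa [String.toList_ofList] using this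
  · intro h; rw [h]

theorem pyCountWhile_eq_runLen (c0 : Char) (i : String) (r : List Char)
    (h : String.ofList [c0] = i) :
    pyCountWhile (fun c => String.ofList [c] == i) r = runLen c0 r := by
  induction r with
  | nil => rfl
  | cons c r ih =>
      simp only [pyCountWhile, runLen, ih]
      have : ((String.ofList [c] == i)) = (c == c0) := by
        subst h
        simp [ofList_singleton_inj]
      rw [this]

theorem pyCountWhile_cons (c0 : Char) (i : String) (r : List Char) :
    pyCountWhile (fun c => String.ofList [c] == i) (c0 :: r)
      = if String.ofList [c0] = i then runLen c0 r + 1 else 0 := by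
  simp only [pyCountWhile]
  by_cases h : String.ofList [c0] = i
  · simp [h, pyCountWhile_eq_runLen c0 i r h]
  · simp [h]

theorem beq_comm_decide (i t : String) : (i == t) = decide (t = i) := by
  by_cases hh : t = i
  · subst hh; simp
  · have h2 : i ≠ t := fun e => hh e.symm
    simp [hh, h2]

theorem f_spec_nil (d : List String) (cnt : Int) (h : 0 ≤ cnt) :
    d.foldl (fun cnt i =>
      let c1 : Int := (pyCountWhile (fun c => String.ofList [c] == i) ([] : List Char).reverse : Nat)
      let c2 : Int := (pyCountWhile (fun c => String.ofList [c] == i) ([] : List Char) : Nat)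
      max cnt (max c1 c2)) cnt = cnt := by
  induction d generalizing cnt with
  | nil => rfl
  | cons i d ih =>
      simp only [List.foldl]
      have : max cnt (max ((pyCountWhile (fun c => String.ofList [c] == i) ([] : List Char).reverse : Nat) : Int)
          ((pyCountWhile (fun c => String.ofList [c] == i) ([] : List Char) : Nat) : Int)) = cnt := by
        simp only [List.reverse_nil, pyCountWhile, Nat.cast_zero, max_self, max_eq_left h]
      rw [this, ih cnt h]

theorem f_spec_cons (c0 c1 : Char) (r0 r1 : List Char) (d : List String) (cnt : Int)
    (h : 0 ≤ cnt) :
    d.foldl (fun cnt i =>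
      let c1v : Int := (pyCountWhile (fun c => String.ofList [c] == i) (c1 :: r1) : Nat)
      let c2v : Int := (pyCountWhile (fun c => String.ofList [c] == i) (c0 :: r0) : Nat)
      max cnt (max c1v c2v)) cnt
    = d.foldl (fun cnt i =>
        let lead : Int := (runLen c0 r0 : Nat) + 1
        let trail : Int := (runLen c1 r1 : Nat) + 1
        let cnt1 := if i == String.ofList [c0] && decide (cnt < lead) then lead else cnt
        if i == String.ofList [c1] && decide (cnt1 < trail) then trail else cnt1) cnt := by
  induction d generalizing cnt with
  | nil => rfl
  | cons i d ih =>
      simp only [List.foldl]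
      have hstep :
          max cnt (max ((pyCountWhile (fun c => String.ofList [c] == i) (c1 :: r1) : Nat) : Int)
            ((pyCountWhile (fun c => String.ofList [c] == i) (c0 :: r0) : Nat) : Int))
          = (let lead : Int := (runLen c0 r0 : Nat) + 1
             let trail : Int := (runLen c1 r1 : Nat) + 1
             let cnt1 := if i == String.ofList [c0] && decide (cnt < lead) then lead else cnt
             if i == String.ofList [c1] && decide (cnt1 < trail) then trail else cnt1) := by
        rw [pyCountWhile_cons c0 i r0, pyCountWhile_cons c1 i r1,
            beq_comm_decide i (String.ofList [c0]), beq_comm_decide i (String.ofList [c1])]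
        by_cases h0 : String.ofList [c0] = i <;> by_cases h1 : String.ofList [c1] = i <;>
          simp only [h0, h1, decide_true, decide_false, Bool.true_and, Bool.false_and,
            if_false, decide_eq_true_eq] <;>
          simp [max_def] <;> omega
      rw [hstep]
      have h' : 0 ≤ (if i == String.ofList [c1] &&
              decide ((if i == String.ofList [c0] && decide (cnt < ((runLen c0 r0 : Nat) : Int) + 1)
                        then ((runLen c0 r0 : Nat) : Int) + 1 else cnt) < ((runLen c1 r1 : Nat) : Int) + 1)
            then ((runLen c1 r1 : Nat) : Int) + 1
            else (if i == String.ofList [c0] && decide (cnt < ((runLen c0 r0 : Nat) : Int) + 1)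
                    then ((runLen c0 r0 : Nat) : Int) + 1 else cnt)) := by
        split_ifs <;> omega
      exact ih _ h'

-- ===== VERDICT (by name: the statement is the Claim_ definition above) =====
theorem f_spec : Claim_equal_f := by
  intro s d _
  unfold Spec_f f f_alt
  cases hs : s.toList with
  | nil =>
      simp only [List.reverse_nil]
      exact f_spec_nil d 0 le_rfl
  | cons c0 r0 =>
      have hrev : ∃ c1 r1, (c0 :: r0).reverse = c1 :: r1 := by
        cases h : (c0 :: r0).reverse with
        | nil => exact absurd (congrArg List.length h) (by simp)
        | cons a b => exact ⟨a, b, rfl⟩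
      obtain ⟨c1, r1, hrev⟩ := hrev
      simp only [hrev]
      exact f_spec_cons c0 c1 r0 r1 d 0 le_rfl
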